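-- pv_equiv track=rewrite | github.com/rolansy/PyLadder | Programming, Data Structures And Algorithms but its PYTHONNN/trial.py | hillvalley
-- ===== SOURCE A (Python) =====
-- def hillvalley(l):
--     if len(l) < 3:  # A hill or valley must have at least 3 elements
--         return False
--
--     # Determine if we start ascending or descending
--     if l[1] > l[0]:  # We start ascending
--         ascending = True
--     else:  # We start descending
--         ascending = False
--
--     for i in range(1, len(l) - 1):
--         if ascending:
--             if l[i] > l[i+1]:  # Switch from ascending to descending
--                 ascending = False
--         else:  # We are descending
--             if l[i] < l[i+1]:  # If we switch back to ascending, it's not a hill or valley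
--                 return False
--
--     # If we've gone through the whole list without returning, it's a hill or valley
--     return not ascending
-- ===== SOURCE B (Python) =====
-- def hillvalley(l):
--     n = len(l)
--     if n < 3:
--         return False
--     if l[1] > l[0]:
--         # ascending start: climb to the peak (plateaus keep climbing)
--         i = 1
--         while i < n - 1 and l[i] <= l[i + 1]:
--             i += 1
--         if i == n - 1:
--             return False  # never peaked
--     else:
--         i = 1
--     # descend phase: no rise allowed
--     while i < n - 1:
--         if l[i] < l[i + 1]:
--             return False
--         i += 1
--     return True
-- ===== Notes on version B (the rewrite author's own statement) =====
-- stated objective: alternative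
-- what changed: Replaces A's single flagged scan (an 'ascending' boolean mutated inside one for-loop) by two explicit phase walks: a climb loop that advances to the peak (returning False if the list never peaks) followed by a descend loop that rejects any rise.
import Mathlib
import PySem

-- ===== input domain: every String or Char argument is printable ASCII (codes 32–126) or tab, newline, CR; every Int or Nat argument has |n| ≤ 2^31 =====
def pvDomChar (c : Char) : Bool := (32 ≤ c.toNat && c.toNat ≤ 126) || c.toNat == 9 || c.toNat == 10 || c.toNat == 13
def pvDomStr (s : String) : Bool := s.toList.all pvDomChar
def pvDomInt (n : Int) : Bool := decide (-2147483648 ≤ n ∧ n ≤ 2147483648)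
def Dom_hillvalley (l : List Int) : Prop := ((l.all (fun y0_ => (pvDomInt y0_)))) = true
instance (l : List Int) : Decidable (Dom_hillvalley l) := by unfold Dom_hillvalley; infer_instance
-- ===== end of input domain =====

-- B replaces A's single flagged scan by two explicit phase walks (climb to the peak, then descend); same O(n) cost, different decomposition.

-- ===== PORT A =====
-- l[i] for an index that is always in range (all accesses in both programs are at 0 ≤ i < len l)
def pvAt (l : List Int) (i : Int) : Int := PySem.List.pyGetD l i 0

-- A's for-loop over range(1, len(l)-1): the 'ascending' flag is the Bool state; 'none' = the early 'return False'
def hvLoopA (l : List Int) : List Int → Bool → Option Bool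
  | [], asc => some asc
  | i :: rest, asc =>
    if asc then
      if pvAt l i > pvAt l (i + 1) then hvLoopA l rest false else hvLoopA l rest true
    else
      if pvAt l i < pvAt l (i + 1) then none else hvLoopA l rest false

def hillvalley (l : List Int) : Bool :=
  if l.length < 3 then false
  else
    let asc := pvAt l 1 > pvAt l 0
    match hvLoopA l (PySem.List.pyRange 1 ((l.length : Int) - 1) 1) asc with
    | none => false
    | some a => !a

-- ===== PORT B =====
-- climb loop: while i < n-1 and l[i] <= l[i+1]: i += 1   (fuel = len l bounds the iterations; never exhausted)
def hvClimb (l : List Int) : Int → Nat → Int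
  | i, 0 => i
  | i, fuel + 1 =>
    if i < (l.length : Int) - 1 ∧ pvAt l i ≤ pvAt l (i + 1) then hvClimb l (i + 1) fuel else i

-- descend loop: while i < n-1: if l[i] < l[i+1]: return False; i += 1; return True
def hvDescend (l : List Int) : Int → Nat → Bool
  | _, 0 => true
  | i, fuel + 1 =>
    if i < (l.length : Int) - 1 then
      if pvAt l i < pvAt l (i + 1) then false else hvDescend l (i + 1) fuel
    else true

def hillvalley_alt (l : List Int) : Bool :=
  if l.length < 3 then false
  else if pvAt l 1 > pvAt l 0 then
    let i := hvClimb l 1 l.length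
    if i = (l.length : Int) - 1 then false else hvDescend l i l.length
  else hvDescend l 1 l.length

-- ===== PRECONDITION & SPEC =====
def Spec_hillvalley (l : List Int) (out : Bool) : Prop := out = hillvalley_alt l
instance (l : List Int) (out : Bool) : Decidable (Spec_hillvalley l out) := by unfold Spec_hillvalley; infer_instance

-- ===== CLAIM (what is proved, stated in full; the proofs are below) =====
def Claim_equal_hillvalley : Prop := ∀ (l : List Int), Dom_hillvalley l → Spec_hillvalley l (hillvalley l)

-- ===== LEMMAS AND PROOFS =====

-- A's loop in the descending state is B's descend loop
theorem hvLoopA_false_eq_descend (l : List Int) :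
    ∀ (fuel : Nat) (i : Int), (l.length : Int) - 1 ≤ i + fuel →
      hvLoopA l (PySem.List.pyRange i ((l.length : Int) - 1) 1) false
        = (if hvDescend l i fuel then some false else none) := by
  intro fuel
  induction fuel with
  | zero =>
    intro i h
    rw [PySem.List.pyRange_one_eq_nil (by omega)]
    simp [hvLoopA, hvDescend]
  | succ fuel ih =>
    intro i h
    by_cases hi : i < (l.length : Int) - 1
    · rw [PySem.List.pyRange_one_cons hi]
      by_cases hlt : pvAt l i < pvAt l (i + 1)
      · simp [hvLoopA, hvDescend, hi, hlt]
      · simp only [hvLoopA, hvDescend, if_pos hi, if_neg hlt]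
        exact ih (i + 1) (by omega)
    · rw [PySem.List.pyRange_one_eq_nil (by omega)]
      simp [hvLoopA, hvDescend, hi]

-- the climb never overshoots the end, and never moves backwards
theorem hvClimb_bounds (l : List Int) :
    ∀ (fuel : Nat) (i : Int), i ≤ (l.length : Int) - 1 →
      i ≤ hvClimb l i fuel ∧ hvClimb l i fuel ≤ (l.length : Int) - 1 := by
  intro fuel
  induction fuel with
  | zero => intro i h; simp [hvClimb]; omega
  | succ fuel ih =>
    intro i h
    by_cases hc : i < (l.length : Int) - 1 ∧ pvAt l i ≤ pvAt l (i + 1)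
    · simp only [hvClimb, if_pos hc]
      have := ih (i + 1) (by omega)
      omega
    · simp only [hvClimb, if_neg hc]; omega

-- A's loop in the ascending state: climb to the peak, then continue in the descending state
theorem hvLoopA_true_eq_climb (l : List Int) :
    ∀ (fuel : Nat) (i : Int), i ≤ (l.length : Int) - 1 → (l.length : Int) - 1 ≤ i + fuel →
      hvLoopA l (PySem.List.pyRange i ((l.length : Int) - 1) 1) true
        = (if hvClimb l i fuel = (l.length : Int) - 1 then some true
           else hvLoopA l (PySem.List.pyRange (hvClimb l i fuel) ((l.length : Int) - 1) 1) false) := by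
  intro fuel
  induction fuel with
  | zero =>
    intro i hle h
    have : i = (l.length : Int) - 1 := by omega
    subst this
    rw [PySem.List.pyRange_one_eq_nil (by omega)]
    simp [hvLoopA, hvClimb]
  | succ fuel ih =>
    intro i hle h
    by_cases hi : i < (l.length : Int) - 1
    · by_cases hle2 : pvAt l i ≤ pvAt l (i + 1)
      · have hcl : hvClimb l i (fuel + 1) = hvClimb l (i + 1) fuel := by
          simp [hvClimb, hi, hle2]
        rw [PySem.List.pyRange_one_cons hi]
        have hgt : ¬ pvAt l i > pvAt l (i + 1) := by omega
        simp only [hvLoopA, if_neg hgt, if_true, hcl]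
        exact ih (i + 1) (by omega) (by omega)
      · have hcl : hvClimb l i (fuel + 1) = i := by
          simp [hvClimb, hle2]
        rw [hcl, if_neg (by omega)]
        rw [PySem.List.pyRange_one_cons hi]
        have hgt : pvAt l i > pvAt l (i + 1) := by omega
        have hnlt : ¬ pvAt l i < pvAt l (i + 1) := by omega
        simp only [hvLoopA, if_pos hgt, if_true, if_neg hnlt]
        simp
    · have : i = (l.length : Int) - 1 := by omega
      subst this
      rw [PySem.List.pyRange_one_eq_nil (by omega)]
      have hcl : hvClimb l ((l.length : Int) - 1) (fuel + 1) = (l.length : Int) - 1 := by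
        simp [hvClimb]
      simp [hvLoopA, hcl]

-- ===== VERDICT (by name: the statement is the Claim_ definition above) =====
theorem hillvalley_spec : Claim_equal_hillvalley := by
  intro l _
  unfold Spec_hillvalley hillvalley hillvalley_alt
  by_cases hn : l.length < 3
  · simp [hn]
  · simp only [if_neg hn]
    have hn3 : (3 : Int) ≤ (l.length : Int) := by exact_mod_cast Nat.le_of_not_lt hn
    by_cases hasc : pvAt l 1 > pvAt l 0
    · simp only [if_pos hasc]
      rw [decide_eq_true hasc]
      rw [hvLoopA_true_eq_climb l l.length 1 (by omega) (by omega)]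
      set j := hvClimb l 1 l.length with hj
      by_cases hend : j = (l.length : Int) - 1
      · simp [hend]
      · have hb := hvClimb_bounds l l.length 1 (by omega)
        rw [if_neg hend,
            hvLoopA_false_eq_descend l l.length j (by omega)]
        by_cases hd : hvDescend l j l.length
        · simp [hd, hend]
        · simp [hd, hend]
    · simp only [if_neg hasc]
      rw [decide_eq_false hasc]
      rw [hvLoopA_false_eq_descend l l.length 1 (by omega)]
      by_cases hd : hvDescend l 1 l.length
      · simp [hd]
      · simp [hd]
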